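-- pv_equiv track=rewrite | github.com/Yudeeswaran/resume_extraction | test2.py | format_points
-- ===== SOURCE A (Python) =====
-- def format_points(content):
--     points = content.strip().split('\n')  # Split by new lines to get individual points
--     formatted_lines = []
--
--     # Group points into pairs for formatting
--     for i in range(0, len(points), 2):
--         line = ""
--         if i < len(points):
--             line += points[i].strip()  # First point
--         if i + 1 < len(points):
--             line += " | " + points[i + 1].strip()  # Second point (if exists)
--         formatted_lines.append(line)
--
--     return '\n'.join(formatted_lines)
-- ===== SOURCE B (Python) =====
-- from itertools import zip_longest
--
--
-- def format_points(content):
--     points = content.strip().split('\n')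
--     evens, odds = points[0::2], points[1::2]
--     lines = [a.strip() if b is None else a.strip() + " | " + b.strip()
--              for a, b in zip_longest(evens, odds)]
--     return '\n'.join(lines)
-- ===== Notes on version B (the rewrite author's own statement) =====
-- stated objective: idiomatic
-- what changed: Replaces index arithmetic stepping by 2 over one list with slicing into even/odd parallel subsequences zipped by itertools.zip_longest and a comprehension.
import Mathlib
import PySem

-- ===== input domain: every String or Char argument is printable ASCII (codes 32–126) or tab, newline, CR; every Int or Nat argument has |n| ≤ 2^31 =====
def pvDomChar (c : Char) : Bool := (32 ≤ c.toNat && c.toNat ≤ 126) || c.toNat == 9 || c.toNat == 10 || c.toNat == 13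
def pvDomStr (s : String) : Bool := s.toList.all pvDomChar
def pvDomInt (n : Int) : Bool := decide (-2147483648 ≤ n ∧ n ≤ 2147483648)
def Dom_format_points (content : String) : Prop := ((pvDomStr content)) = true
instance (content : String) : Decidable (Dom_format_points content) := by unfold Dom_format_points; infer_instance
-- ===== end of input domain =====

-- B pairs the lines by slicing into even/odd subsequences and zipping them (idiomatic),
-- instead of A's index loop stepping by 2; return values are proved equal on all inputs.

-- ===== PORT A =====
def format_points (content : String) : String :=
  let points := (PySem.Str.split? (PySem.Str.strip content) "\n").getD []
  let formatted_lines := (PySem.List.pyRange 0 (PySem.List.len points) 2).foldl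
    (fun acc i =>
      let line : String := ""
      let line := if i < PySem.List.len points then line ++ PySem.Str.strip (PySem.List.pyGetD points i "") else line
      let line := if i + 1 < PySem.List.len points then line ++ " | " ++ PySem.Str.strip (PySem.List.pyGetD points (i + 1) "") else line
      acc ++ [line]) []
  PySem.Str.join "\n" formatted_lines

-- ===== PORT B =====
-- the loop over zip_longest(evens, odds): b = None ↔ odds exhausted
def pvZipPairs : List String → List String → List String
  | [], _ => []
  | a :: as, [] => PySem.Str.strip a :: pvZipPairs as []
  | a :: as, b :: bs => (PySem.Str.strip a ++ " | " ++ PySem.Str.strip b) :: pvZipPairs as bs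

def format_points_alt (content : String) : String :=
  let points := (PySem.Str.split? (PySem.Str.strip content) "\n").getD []
  let evens := (PySem.List.slice? points none none 2).getD []
  let odds := (PySem.List.slice? points (some 1) none 2).getD []
  PySem.Str.join "\n" (pvZipPairs evens odds)

-- ===== PRECONDITION & SPEC =====
def Spec_format_points (content : String) (out : String) : Prop := out = format_points_alt content
instance (content : String) (out : String) : Decidable (Spec_format_points content out) := by unfold Spec_format_points; infer_instance

-- ===== CLAIM (what is proved, stated in full; the proofs are below) =====
def Claim_equal_format_points : Prop := ∀ (content : String), Dom_format_points content → Spec_format_points content (format_points content)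

-- ===== LEMMAS AND PROOFS =====

-- two-step list induction principle
theorem pvTwoStep {α : Type} (P : List α → Prop) (h0 : P []) (h1 : ∀ a, P [a])
    (h2 : ∀ a b r, P r → P (a :: b :: r)) : ∀ l, P l
  | [] => h0
  | [a] => h1 a
  | a :: b :: r => h2 a b r (pvTwoStep P h0 h1 h2 r)

-- canonical pairing recursion both sides are reduced to
def pairRec {α β : Type} (w : α → α → β) (u : α → β) : List α → List β
  | [] => []
  | [a] => [u a]
  | a :: b :: r => w a b :: pairRec w u r

theorem pvFoldlApp {ι β : Type} (f : ι → β) : ∀ (l : List ι) (acc : List β),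
    l.foldl (fun acc i => acc ++ [f i]) acc = acc ++ l.map f := by
  intro l
  induction l with
  | nil => simp
  | cons x xs ih => intro acc; simp [ih]

theorem pvIdx2 {α : Type} (a b : α) (l : List α) (k : ℕ) :
    (a :: b :: l)[2 * (k + 1)]? = l[2 * k]? := by
  have h : 2 * (k + 1) = (2 * k) + 1 + 1 := by ring
  rw [h, List.getElem?_cons_succ, List.getElem?_cons_succ]

theorem pvIdx2' {α : Type} (a b : α) (l : List α) (k : ℕ) :
    (a :: b :: l)[2 * (k + 1) + 1]? = l[2 * k + 1]? := by
  have h : 2 * (k + 1) + 1 = (2 * k + 1) + 1 + 1 := by ring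
  rw [h, List.getElem?_cons_succ, List.getElem?_cons_succ]

-- evens slice as filterMap over range
def pvEveryOther {α : Type} : List α → List α
  | [] => []
  | [a] => [a]
  | a :: _ :: r => a :: pvEveryOther r

theorem pvE1 {α : Type} : ∀ (l : List α),
    (List.range ((l.length + 1) / 2)).filterMap (fun k => l[2 * k]?) = pvEveryOther l := by
  refine pvTwoStep _ (by simp [pvEveryOther]) (fun a => by simp [pvEveryOther]) ?_
  intro a b r ih
  have hc : (a :: b :: r).length + 1 = (r.length + 1) + 2 := by simp
  rw [hc]
  have h2 : ((r.length + 1) + 2) / 2 = (r.length + 1) / 2 + 1 := by omega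
  rw [h2, List.range_succ_eq_map, List.filterMap_cons, List.filterMap_map]
  simp only [Function.comp]
  simp [pvEveryOther, pvIdx2, ih]

theorem pvE2 {α : Type} : ∀ (l : List α),
    (List.range (l.length / 2)).filterMap (fun k => l[2 * k + 1]?) = pvEveryOther l.tail := by
  refine pvTwoStep _ (by simp [pvEveryOther]) (fun a => by simp [pvEveryOther]) ?_
  intro a b r ih
  have hc : (a :: b :: r).length = r.length + 2 := by simp
  rw [hc]
  have h2 : (r.length + 2) / 2 = r.length / 2 + 1 := by omega
  rw [h2, List.range_succ_eq_map, List.filterMap_cons, List.filterMap_map]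
  simp only [Function.comp]
  cases r with
  | nil => simp [pvEveryOther]
  | cons c r' =>
      simp only [List.tail_cons] at ih ⊢
      rw [show ((a :: b :: c :: r')[2 * 0 + 1]?) = some b from rfl]
      have hfun : (fun x : ℕ => (a :: b :: c :: r')[2 * x.succ + 1]?) = fun x => (c :: r')[2 * x + 1]? :=
        funext fun x => pvIdx2' a b (c :: r') x
      rw [hfun, ih]
      rfl

theorem pvGetD2 {α : Type} (a b : α) (l : List α) (k : ℕ) (d : α) :
    (a :: b :: l).getD (2 * (k + 1)) d = l.getD (2 * k) d := by
  have h : 2 * (k + 1) = (2 * k) + 1 + 1 := by ring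
  rw [h, List.getD_cons_succ, List.getD_cons_succ]

theorem pvGetD2' {α : Type} (a b : α) (l : List α) (k : ℕ) (d : α) :
    (a :: b :: l).getD (2 * (k + 1) + 1) d = l.getD (2 * k + 1) d := by
  have h : 2 * (k + 1) + 1 = (2 * k + 1) + 1 + 1 := by ring
  rw [h, List.getD_cons_succ, List.getD_cons_succ]

theorem pvCore {α β : Type} (w : α → α → β) (u : α → β) (d : α) : ∀ (l : List α),
    (List.range ((l.length + 1) / 2)).map
      (fun k => if 2 * k + 1 < l.length then w (l.getD (2 * k) d) (l.getD (2 * k + 1) d)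
                else u (l.getD (2 * k) d)) = pairRec w u l := by
  refine pvTwoStep _ (by simp [pairRec]) (fun a => by simp [pairRec]) ?_
  intro a b r ih
  have hc : (a :: b :: r).length + 1 = (r.length + 1) + 2 := by simp
  rw [hc]
  have h2 : ((r.length + 1) + 2) / 2 = (r.length + 1) / 2 + 1 := by omega
  rw [h2, List.range_succ_eq_map, List.map_cons, List.map_map]
  have hhead : (if 2 * 0 + 1 < (a :: b :: r).length then
      w ((a :: b :: r).getD (2 * 0) d) ((a :: b :: r).getD (2 * 0 + 1) d)
      else u ((a :: b :: r).getD (2 * 0) d)) = w a b := by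
    rw [if_pos (by simp only [List.length_cons]; omega)]
    rfl
  have hfun : ((fun k => if 2 * k + 1 < (a :: b :: r).length then
        w ((a :: b :: r).getD (2 * k) d) ((a :: b :: r).getD (2 * k + 1) d)
        else u ((a :: b :: r).getD (2 * k) d)) ∘ Nat.succ) =
      (fun k => if 2 * k + 1 < r.length then w (r.getD (2 * k) d) (r.getD (2 * k + 1) d)
        else u (r.getD (2 * k) d)) := by
    funext k
    simp only [Function.comp_apply, Nat.succ_eq_add_one]
    by_cases h : 2 * k + 1 < r.length
    · rw [if_pos (by simp only [List.length_cons]; omega), if_pos h, pvGetD2, pvGetD2']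
    · rw [if_neg (by simp only [List.length_cons]; omega), if_neg h, pvGetD2]
  rw [hhead, hfun, ih]
  rfl

theorem pvEveryOther_cons {α : Type} (x : α) (ys : List α) :
    pvEveryOther (x :: ys) = x :: pvEveryOther ys.tail := by
  cases ys <;> rfl

theorem pvZipPairRec : ∀ (l : List String),
    pvZipPairs (pvEveryOther l) (pvEveryOther l.tail) =
      pairRec (fun a b => PySem.Str.strip a ++ " | " ++ PySem.Str.strip b) PySem.Str.strip l := by
  refine pvTwoStep _ (by simp [pvEveryOther, pvZipPairs, pairRec]) (fun a => by simp [pvEveryOther, pvZipPairs, pairRec]) ?_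
  intro a b r ih
  simp only [List.tail_cons]
  rw [show pvEveryOther (a :: b :: r) = a :: pvEveryOther r from rfl, pvEveryOther_cons]
  simp [pvZipPairs, pairRec, ih]

theorem pvSliceE {α : Type} (l : List α) :
    PySem.List.slice? l none none 2 = some (pvEveryOther l) := by
  rw [← pvE1 l]
  simp only [PySem.List.slice?, PySem.List.sliceIndices]
  norm_num
  have hcnt : (if 0 < l.length then (((l.length : ℤ) + 2 - 1) / 2).toNat else 0) = (l.length + 1) / 2 := by
    split_ifs with h <;> omega
  rw [hcnt]
  have hx : (fun x : ℕ => l[(2 * (x : ℤ)).toNat]?) = fun x => l[2 * x]? := by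
    funext x
    have h1 : ((2 * (x : ℤ)).toNat) = 2 * x := by omega
    rw [h1]
  rw [hx]

theorem pvSliceO {α : Type} (l : List α) :
    PySem.List.slice? l (some 1) none 2 = some (pvEveryOther l.tail) := by
  rw [← pvE2 l]
  cases l with
  | nil => simp [PySem.List.slice?, PySem.List.sliceIndices]
  | cons a as =>
      simp only [PySem.List.slice?, PySem.List.sliceIndices]
      norm_num
      have hcnt : (if 0 < as.length then (((as.length : ℤ) + 2 - 1) / 2).toNat else 0) = (as.length + 1) / 2 := by
        split_ifs with h <;> omega
      rw [hcnt]
      have hx : (fun x : ℕ => (a :: as)[(1 + 2 * (x : ℤ)).toNat]?) = fun x => as[2 * x]? := by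
        funext x
        have h1 : ((1 + 2 * (x : ℤ)).toNat) = 2 * x + 1 := by omega
        rw [h1, List.getElem?_cons_succ]
      rw [hx]

theorem pvMain (pts : List String) :
    PySem.Str.join "\n" ((PySem.List.pyRange 0 (PySem.List.len pts) 2).foldl
      (fun acc i =>
        let line : String := ""
        let line := if i < PySem.List.len pts then line ++ PySem.Str.strip (PySem.List.pyGetD pts i "") else line
        let line := if i + 1 < PySem.List.len pts then line ++ " | " ++ PySem.Str.strip (PySem.List.pyGetD pts (i + 1) "") else line
        acc ++ [line]) []) =
    PySem.Str.join "\n" (pvZipPairs ((PySem.List.slice? pts none none 2).getD [])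
      ((PySem.List.slice? pts (some 1) none 2).getD [])) := by
  rw [pvSliceE, pvSliceO]
  simp only [Option.getD_some]
  rw [pvZipPairRec,
    ← pvCore (fun a b => PySem.Str.strip a ++ " | " ++ PySem.Str.strip b) PySem.Str.strip "" pts]
  congr 1
  simp only [pvFoldlApp, List.nil_append]
  rw [PySem.List.len_eq, PySem.List.pyRange_of_pos 0 _ (by norm_num), List.map_map]
  have hcnt : (if (0:ℤ) < (pts.length : ℤ) then (((pts.length : ℤ) - 0 + 2 - 1) / 2).toNat else 0)
      = (pts.length + 1) / 2 := by
    split_ifs with h <;> omega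
  rw [hcnt]
  refine List.map_congr_left ?_
  intro k hk
  rw [List.mem_range] at hk
  simp only [Function.comp_apply]
  have h1 : (0 : ℤ) + 2 * (k : ℤ) < (pts.length : ℤ) := by omega
  rw [if_pos h1]
  have e1 : PySem.List.pyGetD pts (0 + 2 * (k : ℤ)) "" = pts.getD (2 * k) "" := by
    rw [PySem.List.pyGetD_of_nonneg pts "" (by omega)]
    congr 1
    omega
  have e2 : PySem.List.pyGetD pts ((0 + 2 * (k : ℤ)) + 1) "" = pts.getD (2 * k + 1) "" := by
    rw [PySem.List.pyGetD_of_nonneg pts "" (by omega)]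
    congr 1
    omega
  rw [e1, e2]
  have estr : "" ++ PySem.Str.strip (pts.getD (2 * k) "") = PySem.Str.strip (pts.getD (2 * k) "") := by
    simp
  rw [estr]
  by_cases h2 : 2 * k + 1 < pts.length
  · rw [if_pos (show (0 + 2 * (k : ℤ)) + 1 < (pts.length : ℤ) by omega), if_pos h2]
  · rw [if_neg (show ¬ ((0 + 2 * (k : ℤ)) + 1 < (pts.length : ℤ)) by omega), if_neg h2]

-- ===== VERDICT (by name: the statement is the Claim_ definition above) =====
theorem format_points_spec : Claim_equal_format_points := by
  intro content _
  show format_points content = format_points_alt content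
  exact pvMain ((PySem.Str.split? (PySem.Str.strip content) "\n").getD [])
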